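-- pv_equiv track=rewrite | github.com/MrBrantCode/unitest_baseline | mut_generate/mist_train_cf/cf_46637/solution.py | uncommon_elements
-- ===== SOURCE A (Python) =====
-- def uncommon_elements(sequence):
--     '''
--     Given a non-empty list of positive integers, return all distinct integers with a frequency exceeding half the integer's value.
--     The frequency of an integer denotes its occurrence count in the list.
--     If no values meet this criterion, return an empty list.
--     '''
--     frequency = {}
--     result = []
--
--     for element in sequence:
--         if element in frequency:
--             frequency[element] += 1
--         else:
--             frequency[element] = 1
--
--     for key, value in frequency.items():
--         if value > (key / 2):
--             result.append(key)
--
--     return result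
-- ===== SOURCE B (Python) =====
-- def uncommon_elements(sequence):
--     result = []
--     remaining = sequence
--     while remaining:
--         head = remaining[0]
--         rest = [x for x in remaining if x != head]
--         if len(remaining) - len(rest) > head / 2:
--             result.append(head)
--         remaining = rest
--     return result
-- ===== Notes on version B (the rewrite author's own statement) =====
-- stated objective: alternative
-- what changed: Replaces the frequency-dict build plus items pass by an iterative repeated-partition sweep: while elements remain, take the first value, split the list into that value's occurrences and the rest (counting by length difference), decide membership, and continue on the rest.
import Mathlib
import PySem

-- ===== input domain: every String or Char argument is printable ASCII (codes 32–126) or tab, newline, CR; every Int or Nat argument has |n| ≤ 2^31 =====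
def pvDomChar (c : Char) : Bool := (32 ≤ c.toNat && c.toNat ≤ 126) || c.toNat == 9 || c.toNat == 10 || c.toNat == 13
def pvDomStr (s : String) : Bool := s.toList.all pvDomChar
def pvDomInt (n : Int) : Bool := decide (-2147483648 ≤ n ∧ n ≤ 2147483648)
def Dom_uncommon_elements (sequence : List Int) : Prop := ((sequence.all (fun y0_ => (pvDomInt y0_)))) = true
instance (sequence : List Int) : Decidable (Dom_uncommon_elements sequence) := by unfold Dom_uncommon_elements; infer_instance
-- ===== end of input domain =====

-- B replaces A's frequency-dict build + items pass by an iterative repeated-partition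
-- sweep: take the first remaining value, split the list into its occurrences and the
-- rest (counting by length difference), decide membership, continue on the rest.
-- Alternative decomposition, not claimed faster.
-- Python's 'count > head/2' (float) is ported exactly as '2*count > head': on the stated
-- domain (|head| ≤ 2^31, count ≤ list length) both float operands are exact.

-- ===== PORT A =====
def uncommon_elements (sequence : List Int) : List Int :=
  let frequency : PySem.Dict Int Int :=
    sequence.foldl (fun d element =>
      if d.contains element then d.insert element (d.getD element 0 + 1)
      else d.insert element 1) PySem.Dict.empty
  frequency.items.foldl (fun result p =>
    if 2 * p.2 > p.1 then result ++ [p.1] else result) []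

-- ===== PORT B =====
-- the 'while remaining:' loop of Source B, carrying its 'result' accumulator
def altLoop : List Int → List Int → List Int
  | [], result => result
  | head :: tail, result =>
    let rest := (head :: tail).filter (fun x => decide (x ≠ head))
    altLoop rest
      (if 2 * (((head :: tail).length : Int) - (rest.length : Int)) > head
       then result ++ [head] else result)
termination_by remaining _ => remaining.length
decreasing_by
  simp only [List.filter_cons, decide_not, ne_eq, List.length_cons]
  exact Nat.lt_succ_of_le (List.length_filter_le _ tail)

def uncommon_elements_alt (sequence : List Int) : List Int :=
  altLoop sequence []

-- ===== PRECONDITION & SPEC =====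
def Spec_uncommon_elements (sequence : List Int) (out : List Int) : Prop := out = uncommon_elements_alt sequence
instance (sequence : List Int) (out : List Int) : Decidable (Spec_uncommon_elements sequence out) := by unfold Spec_uncommon_elements; infer_instance

-- ===== CLAIM (what is proved, stated in full; the proofs are below) =====
def Claim_equal_uncommon_elements : Prop := ∀ (sequence : List Int), Dom_uncommon_elements sequence → Spec_uncommon_elements sequence (uncommon_elements sequence)

-- ===== LEMMAS AND PROOFS =====

-- A's result is: the distinct elements (first-occurrence order) whose count passes the test.
theorem a_eq_filter (sequence : List Int) :
    uncommon_elements sequence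
    = (PySem.Set.ofList sequence).filter
        (fun k => decide (k < 2 * (sequence.count k : Int))) := by
  unfold uncommon_elements
  have hstep : (fun (d : PySem.Dict Int Int) (element : Int) =>
      if d.contains element then d.insert element (d.getD element 0 + 1)
      else d.insert element 1)
      = (fun d element => d.insert element (d.getD element 0 + 1)) := by
    funext d e
    by_cases h : d.contains e = true
    · simp [h]
    · have h0 : d.getD e 0 = 0 :=
        PySem.Dict.getD_of_not_contains d 0 (by simpa using h)
      simp [h, h0]
  rw [hstep, PySem.Dict.foldl_insert_getD_add_one_eq_counter,
      PySem.List.foldl_append_ite (p := fun p : Int × Int => 2 * p.2 > p.1) (f := Prod.fst),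
      PySem.Dict.items_counter]
  simp [List.filter_map, List.map_map, Function.comp_def]

-- the not-yet-seen elements of l, in first-occurrence order, relative to a seen set
def newOf (seen : PySem.Set Int) : List Int → List Int
  | [] => []
  | e :: l => if e ∈ seen then newOf seen l
              else e :: newOf (seen ++ [e]) l

theorem set_update_eq_append_newOf (l : List Int) (s : PySem.Set Int) :
    PySem.Set.update s l = s ++ newOf s l := by
  induction l generalizing s with
  | nil => simp [PySem.Set.update, newOf]
  | cons e l ih =>
    by_cases h : e ∈ s
    · have := ih s
      simp only [PySem.Set.update, List.foldl_cons] at *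
      simp [PySem.Set.add, h, newOf, this]
    · have := ih (s ++ [e])
      simp only [PySem.Set.update, List.foldl_cons] at *
      simp [PySem.Set.add, h, newOf, this]

theorem newOf_congr (s s' : PySem.Set Int) (l : List Int)
    (h : ∀ x, x ∈ s ↔ x ∈ s') : newOf s l = newOf s' l := by
  induction l generalizing s s' with
  | nil => rfl
  | cons e l ih =>
    by_cases he : e ∈ s
    · rw [newOf, newOf, if_pos he, if_pos ((h e).1 he)]
      exact ih s s' h
    · rw [newOf, newOf, if_neg he, if_neg (fun hx => he ((h e).2 hx))]
      refine congrArg _ (ih _ _ (fun x => ?_))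
      simp [h x]

-- marking e as seen = filtering e out of the rest of the input
theorem newOf_seen_snoc (e : Int) (l : List Int) (s : PySem.Set Int) :
    newOf (s ++ [e]) l = newOf s (l.filter (fun x => decide (x ≠ e))) := by
  induction l generalizing s with
  | nil => rfl
  | cons a l ih =>
    by_cases hae : a = e
    · subst hae
      rw [newOf, if_pos (by simp)]
      simp only [List.filter_cons, ne_eq, not_true, decide_false]
      rw [if_neg (by simp)]
      exact ih s
    · simp only [List.filter_cons]
      rw [if_pos (by simp [hae])]
      by_cases ha : a ∈ s
      · rw [newOf, if_pos (by simp [ha]), newOf, if_pos ha]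
        exact ih s
      · rw [newOf, if_neg (by simp [ha, hae]), newOf, if_neg ha]
        refine congrArg _ ?_
        rw [newOf_congr (s ++ [e] ++ [a]) (s ++ [a] ++ [e]) l (by intro x; simp; tauto)]
        exact ih (s ++ [a])

-- first-occurrence dedup, head-decomposed: set(e::l) starts with e, then set of l without e
theorem ofList_cons_filter (e : Int) (l : List Int) :
    PySem.Set.ofList (e :: l)
    = e :: PySem.Set.ofList (l.filter (fun x => decide (x ≠ e))) := by
  have hof : ∀ m : List Int, PySem.Set.ofList m = newOf PySem.Set.empty m := by
    intro m
    have := set_update_eq_append_newOf m PySem.Set.empty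
    simpa [PySem.Set.ofList_eq_foldl, PySem.Set.update, PySem.Set.empty] using this
  rw [hof, hof, newOf, if_neg (by simp [PySem.Set.empty])]
  congr 1
  have : (PySem.Set.empty : PySem.Set Int) ++ [e] = [] ++ [e] := rfl
  rw [this, newOf_seen_snoc]
  rfl

theorem count_filter_ne (e k : Int) (l : List Int) (hk : k ≠ e) :
    (l.filter (fun x => decide (x ≠ e))).count k = l.count k := by
  rw [List.count_filter (by simp [hk])]

-- the removed occurrences count the head exactly
theorem length_sub_filter (e : Int) (l : List Int) :
    ((l.length : Int) - ((l.filter (fun x => decide (x ≠ e))).length : Int))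
    = (l.count e : Int) := by
  have hp : (fun x : Int => decide (x ≠ e)) = (fun x => !(x == e)) := by
    funext x; by_cases h : x = e <;> simp [h]
  rw [hp]
  induction l with
  | nil => simp
  | cons a l ih =>
    by_cases h : a = e
    · subst h
      simp only [List.filter_cons, List.count_cons, List.length_cons, beq_self_eq_true,
        Bool.not_true]
      push_cast
      omega
    · simp only [List.filter_cons, List.count_cons, List.length_cons,
        beq_iff_eq, if_pos (by simp [h] : ((!(a == e)) = true))]
      simp only [h, if_false]
      push_cast
      push_cast at ih
      omega

theorem altLoop_eq (l res : List Int) :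
    altLoop l res
    = res ++ (PySem.Set.ofList l).filter (fun k => decide (k < 2 * (l.count k : Int))) := by
  fun_induction altLoop l res with
  | case1 res => simp [PySem.Set.ofList]
  | case2 head tail res rest ih =>
    have hrest : rest = tail.filter (fun x => decide (x ≠ head)) := by
      simp [rest]
    have hcnt : (((head :: tail).length : Int) - (rest.length : Int))
        = ((head :: tail).count head : Int) :=
      length_sub_filter head (head :: tail)
    have hmem : ∀ k ∈ PySem.Set.ofList rest,
        (decide (k < 2 * (rest.count k : Int)))
        = (decide (k < 2 * ((head :: tail).count k : Int))) := by
      intro k hk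
      have hkr : k ∈ rest := by simpa [PySem.Set.mem_ofList] using hk
      have hne : k ≠ head := by
        rw [hrest] at hkr
        simpa using (List.of_mem_filter hkr)
      rw [hrest, count_filter_ne _ _ _ hne]
      simp [Ne.symm hne]
    have hhead : (decide (head < 2 * (((head :: tail).count head : Int))))
        = (decide (2 * (((head :: tail).length : Int) - (rest.length : Int)) > head)) := by
      rw [hcnt]
    by_cases hc : 2 * (((head :: tail).length : Int) - (rest.length : Int)) > head
    · rw [dif_pos hc] at ih
      rw [if_pos hc, ih, List.filter_congr hmem, ofList_cons_filter, ← hrest,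
        List.filter_cons, hhead, if_pos (by simpa using hc)]
      simp
    · rw [dif_neg hc] at ih
      rw [if_neg hc, ih, List.filter_congr hmem, ofList_cons_filter, ← hrest,
        List.filter_cons, hhead, if_neg (by simpa using hc)]

-- ===== VERDICT (by name: the statement is the Claim_ definition above) =====
theorem uncommon_elements_spec : Claim_equal_uncommon_elements := by
  intro sequence _
  unfold Spec_uncommon_elements uncommon_elements_alt
  rw [altLoop_eq, a_eq_filter]
  simp
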